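-- pv_equiv track=rewrite | github.com/juvelop17/problem_solving | Codeforces/#690_DIV3/A.py | solution
-- ===== SOURCE A (Python) =====
-- from collections import deque
--
-- def solution(n, blist):
--     deq = deque(blist)
--     ans = []
--     for i in range(len(blist)):
--         if i % 2 == 0:
--             ans.append(deq.popleft())
--         else:
--             ans.append(deq.pop())
--     return ans
-- ===== SOURCE B (Python) =====
-- def solution(n, blist):
--     k = (len(blist) + 1) // 2
--     front = blist[:k]
--     back = blist[k:][::-1]
--     ans = []
--     for f, b in zip(front, back):
--         ans.append(f)
--         ans.append(b)
--     if len(blist) % 2 == 1: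
--         ans.append(front[-1])
--     return ans
-- ===== Notes on version B (the rewrite author's own statement) =====
-- stated objective: alternative
-- what changed: Replaces the deque with alternating popleft/pop by a ceil-split of the list into a front half and a reversed back half that are zipped and interleaved, with the middle element appended for odd lengths.
import Mathlib
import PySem

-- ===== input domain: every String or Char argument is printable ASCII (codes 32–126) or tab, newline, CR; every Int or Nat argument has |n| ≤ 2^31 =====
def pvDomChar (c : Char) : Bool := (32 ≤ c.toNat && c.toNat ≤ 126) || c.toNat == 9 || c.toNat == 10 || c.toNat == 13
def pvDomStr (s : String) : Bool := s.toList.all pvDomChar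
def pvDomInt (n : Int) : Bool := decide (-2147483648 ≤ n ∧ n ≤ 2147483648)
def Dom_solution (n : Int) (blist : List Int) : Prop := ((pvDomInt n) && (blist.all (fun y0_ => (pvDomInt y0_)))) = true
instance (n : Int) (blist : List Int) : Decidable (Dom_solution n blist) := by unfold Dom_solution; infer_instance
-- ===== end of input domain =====

-- B replaces A's deque with alternating popleft/pop by a ceil-split into a front half
-- and a reversed back half, zipped and interleaved (objective: alternative decomposition).


-- ===== PORT A =====
-- one loop iteration of A: i even → popleft, i odd → pop; A's deque is never empty
-- when popped (the loop runs exactly len(blist) times), so the empty fallbacks are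
-- unreachable.
def solutionStepA (st : List Int × List Int) (i : Int) : List Int × List Int :=
  if PySem.Int.mod i 2 == 0 then
    match st.1 with
    | [] => st
    | x :: rest => (rest, st.2 ++ [x])
  else
    (st.1.dropLast, st.2 ++ st.1.getLast?.toList)

def solution (n : Int) (blist : List Int) : List Int :=
  ((PySem.List.pyRange 0 (blist.length : Int) 1).foldl solutionStepA (blist, [])).2

-- ===== PORT B =====
def solution_alt (n : Int) (blist : List Int) : List Int :=
  let k := PySem.Int.floordiv ((blist.length : Int) + 1) 2
  let front := PySem.List.slice blist none (some k)
  let back := (PySem.List.slice blist (some k) none).reverse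
  let ans := (front.zip back).foldl (fun a fb => a ++ [fb.1, fb.2]) []
  if PySem.Int.mod (blist.length : Int) 2 == 1 then
    ans ++ (PySem.List.pyGet? front (-1)).toList
  else ans

-- ===== PRECONDITION & SPEC =====
def Spec_solution (n : Int) (blist : List Int) (out : List Int) : Prop := out = solution_alt n blist
instance (n : Int) (blist : List Int) (out : List Int) : Decidable (Spec_solution n blist out) := by unfold Spec_solution; infer_instance

-- ===== CLAIM (what is proved, stated in full; the proofs are below) =====
def Claim_equal_solution : Prop := ∀ (n : Int) (blist : List Int), Dom_solution n blist → Spec_solution n blist (solution n blist)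

-- ===== LEMMAS AND PROOFS =====

-- canonical alternating pick: head, then last, recurse on the middle
def iv : List Int → List Int
  | [] => []
  | [x] => [x]
  | x :: y :: xs => x :: (y :: xs).getLast (by simp) :: iv ((y :: xs).dropLast)
termination_by l => l.length
decreasing_by simp

-- B's computation written over Nat take/drop and flatMap
def ivCore (l : List Int) : List Int :=
  ((l.take ((l.length + 1) / 2)).zip ((l.drop ((l.length + 1) / 2)).reverse)).flatMap
      (fun fb => [fb.1, fb.2])
    ++ (if l.length % 2 = 1 then (l.take ((l.length + 1) / 2)).getLast?.toList else [])

lemma mod_two_zero_succ {a : Int} (h : PySem.Int.mod a 2 = 0) :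
    PySem.Int.mod (a + 1) 2 = 1 := by
  rw [PySem.Int.mod_eq_emod_of_pos (by norm_num)] at h ⊢; omega

lemma mod_two_zero_add_two {a : Int} (h : PySem.Int.mod a 2 = 0) :
    PySem.Int.mod (a + 1 + 1) 2 = 0 := by
  rw [PySem.Int.mod_eq_emod_of_pos (by norm_num)] at h ⊢; omega

lemma loopA_eq_iv (d : List Int) : ∀ (ans : List Int) (a : Int),
    PySem.Int.mod a 2 = 0 →
    ((PySem.List.pyRange a (a + (d.length : Int)) 1).foldl solutionStepA (d, ans)).2
      = ans ++ iv d := by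
  induction d using iv.induct with
  | case1 =>
      intro ans a hm
      rw [PySem.List.pyRange_one_eq_nil (by simp)]
      simp [iv]
  | case2 x =>
      intro ans a hm
      have hl : ([x] : List Int).length = 1 := rfl
      rw [hl, PySem.List.pyRange_one_cons (by push_cast; omega),
          PySem.List.pyRange_one_eq_nil (by push_cast; omega)]
      simp only [List.foldl_cons, List.foldl_nil]
      unfold solutionStepA
      rw [hm]
      simp [iv]
  | case3 x y xs ih =>
      intro ans a hm
      have hl : (x :: y :: xs).length = xs.length + 2 := by simp
      rw [hl, PySem.List.pyRange_one_cons (by push_cast; omega),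
          PySem.List.pyRange_one_cons (by push_cast; omega)]
      have h1 : solutionStepA (x :: y :: xs, ans) a = (y :: xs, ans ++ [x]) := by
        unfold solutionStepA
        rw [hm]
        simp
      have h2 : solutionStepA (y :: xs, ans ++ [x]) (a + 1)
          = ((y :: xs).dropLast, (ans ++ [x]) ++ [(y :: xs).getLast (by simp)]) := by
        unfold solutionStepA
        rw [mod_two_zero_succ hm]
        simp [List.getLast?_eq_some_getLast]
      have hr : a + ((xs.length + 2 : Nat) : Int)
          = (a + 1 + 1) + (((y :: xs).dropLast.length : Nat) : Int) := by
        push_cast [List.length_dropLast, List.length_cons]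
        omega
      simp only [List.foldl_cons, h1, h2]
      rw [hr, ih ((ans ++ [x]) ++ [(y :: xs).getLast (by simp)]) (a + 1 + 1)
            (mod_two_zero_add_two hm)]
      simp [iv]

lemma alt_eq_ivCore (n : Int) (l : List Int) : solution_alt n l = ivCore l := by
  have hk : PySem.Int.floordiv ((l.length : Int) + 1) 2 = (((l.length + 1) / 2 : Nat) : Int) := by
    rw [PySem.Int.floordiv_eq_ediv_of_pos (by norm_num)]; push_cast; omega
  have hm : PySem.Int.mod ((l.length : Int)) 2 = ((l.length % 2 : Nat) : Int) := by
    rw [PySem.Int.mod_eq_emod_of_pos (by norm_num)]; push_cast; omega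
  unfold solution_alt ivCore
  simp only [hk, hm, PySem.List.slice_to_natCast, PySem.List.slice_from_natCast,
    PySem.List.foldl_append_eq_flatMap, PySem.List.pyGet?_neg_one, List.nil_append]
  by_cases hpar : l.length % 2 = 1
  · simp [hpar]
  · simp [Nat.mod_two_ne_one.mp hpar]

lemma ivCore_eq_iv (l : List Int) : ivCore l = iv l := by
  induction l using iv.induct with
  | case1 => simp [ivCore, iv]
  | case2 x => simp [ivCore, iv]
  | case3 x y xs ih =>
      have htne : (y :: xs) ≠ ([] : List Int) := by simp
      have hsplit : y :: xs = (y :: xs).dropLast ++ [(y :: xs).getLast htne] :=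
        (List.dropLast_append_getLast htne).symm
      set u := (y :: xs).dropLast with hu
      set g := (y :: xs).getLast htne with hg
      have hul : u.length = xs.length := by simp [hu]
      set kb := (u.length + 1) / 2 with hkb
      have hkble : kb ≤ u.length := by omega
      have hlen : (x :: y :: xs).length = u.length + 2 := by simp [hul]
      have hk2 : ((x :: y :: xs).length + 1) / 2 = kb + 1 := by rw [hlen]; omega
      have htake : (x :: y :: xs).take (kb + 1) = x :: u.take kb := by
        rw [List.take_succ_cons]
        conv_lhs => rw [hsplit]
        rw [List.take_append_of_le_length hkble]
      have hdrop : (x :: y :: xs).drop (kb + 1) = u.drop kb ++ [g] := by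
        rw [List.drop_succ_cons]
        conv_lhs => rw [hsplit]
        rw [List.drop_append_of_le_length hkble]
      have hivc : iv (x :: y :: xs) = x :: g :: iv u := by rw [iv]
      unfold ivCore
      rw [hk2, htake, hdrop, hlen, hivc, ← ih]
      unfold ivCore
      rw [← hkb]
      by_cases hpar : u.length % 2 = 1
      · have hp2 : (u.length + 2) % 2 = 1 := by omega
        have hkpos : 1 ≤ kb := by rw [hkb]; omega
        have hlentk : (u.take kb).length = kb := by rw [List.length_take]; omega
        have htkne : u.take kb ≠ [] := by
          intro hemp
          rw [hemp] at hlentk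
          simp only [List.length_nil] at hlentk
          omega
        obtain ⟨b, bs, hb⟩ := List.exists_cons_of_ne_nil htkne
        rw [hp2, hb]
        simp [hpar, List.getLast?_cons_cons]
      · have hp2 : (u.length + 2) % 2 = 0 := by omega
        rw [hp2]
        simp [hpar]

-- ===== VERDICT (by name: the statement is the Claim_ definition above) =====
theorem solution_spec : Claim_equal_solution := by
  intro n blist _
  unfold Spec_solution solution
  rw [alt_eq_ivCore, ivCore_eq_iv]
  have h := loopA_eq_iv blist [] 0 (by decide)
  simpa using h
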